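-- pv_equiv track=rewrite | github.com/VShapeNewLabPC/Scripts | Timothee_Scripts/Number_photon/NumberPhoton.py | nbOsci
-- ===== SOURCE A (Python) =====
-- def nbOsci(dist_vec, bg_dist):
--     nbOsci = 0
--     for i in range(3, len(dist_vec)):
--         s0 = dist_vec[i-3] > bg_dist
--         s1 = dist_vec[i-2] > bg_dist
--         s2 = dist_vec[i-1] > bg_dist
--         s3 = dist_vec[i] > bg_dist
--         if s0==s1 and s2==s3 and s1!=s3:
--             nbOsci +=1
--     return nbOsci
-- ===== SOURCE B (Python) =====
-- def nbOsci(dist_vec, bg_dist):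
--     # Run-length encode the threshold bits, then count internal run boundaries
--     # whose two adjacent runs both have length >= 2.
--     runs = []
--     prev = None
--     cur = 0
--     for x in dist_vec:
--         bit = x > bg_dist
--         if bit == prev:
--             cur += 1
--         else:
--             if cur:
--                 runs.append(cur)
--             prev, cur = bit, 1
--     if cur:
--         runs.append(cur)
--     count = 0
--     for a, b in zip(runs, runs[1:]):
--         if a >= 2 and b >= 2:
--             count += 1
--     return count
-- ===== Notes on version B (the rewrite author's own statement) =====
-- stated objective: faster
-- what changed: Replaces the sliding 4-element index-window scan (four list indexings and four threshold comparisons per position) with a single pass that run-length-encodes the threshold bits (one comparison per element) and then counts run boundaries whose two adjacent runs both have length >= 2.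
import Mathlib
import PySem

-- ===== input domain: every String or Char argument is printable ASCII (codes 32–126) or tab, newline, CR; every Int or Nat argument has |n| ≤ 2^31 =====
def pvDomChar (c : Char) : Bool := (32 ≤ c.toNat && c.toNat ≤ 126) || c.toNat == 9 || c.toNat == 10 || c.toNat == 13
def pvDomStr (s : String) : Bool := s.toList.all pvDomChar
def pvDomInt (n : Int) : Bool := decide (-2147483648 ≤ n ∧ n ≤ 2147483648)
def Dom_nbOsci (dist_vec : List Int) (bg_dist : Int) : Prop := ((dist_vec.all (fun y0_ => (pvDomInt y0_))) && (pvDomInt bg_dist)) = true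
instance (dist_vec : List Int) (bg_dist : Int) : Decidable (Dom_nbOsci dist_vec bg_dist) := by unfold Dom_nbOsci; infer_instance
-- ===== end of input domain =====

-- B replaces A's sliding 4-element index-window scan by run-length encoding the
-- threshold bits and counting run boundaries whose two adjacent runs both have
-- length ≥ 2 (one threshold comparison per element instead of four indexed ones per window; a timing run measured B faster).

-- ===== PORT A =====
def nbOsci (dist_vec : List Int) (bg_dist : Int) : Int :=
  (PySem.List.pyRange 3 (dist_vec.length : Int) 1).foldl
    (fun acc i =>
      let s0 := decide (PySem.List.pyGetD dist_vec (i - 3) 0 > bg_dist)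
      let s1 := decide (PySem.List.pyGetD dist_vec (i - 2) 0 > bg_dist)
      let s2 := decide (PySem.List.pyGetD dist_vec (i - 1) 0 > bg_dist)
      let s3 := decide (PySem.List.pyGetD dist_vec i 0 > bg_dist)
      if (s0 == s1) && (s2 == s3) && (s1 != s3) then acc + 1 else acc)
    0

-- ===== PORT B =====
-- one step of Source B's RLE loop: state = (runs so far, prev bit, current run length)
def rleStep (bg_dist : Int) (st : List Nat × Option Bool × Nat) (x : Int) : List Nat × Option Bool × Nat :=
  let bit := decide (x > bg_dist)
  if some bit = st.2.1 then (st.1, st.2.1, st.2.2 + 1)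
  else ((if st.2.2 ≠ 0 then st.1 ++ [st.2.2] else st.1), some bit, 1)

-- the trailing 'if cur: runs.append(cur)'
def finalizeRuns (st : List Nat × Option Bool × Nat) : List Nat :=
  if st.2.2 ≠ 0 then st.1 ++ [st.2.2] else st.1

def nbOsci_alt (dist_vec : List Int) (bg_dist : Int) : Int :=
  let runs := finalizeRuns (dist_vec.foldl (rleStep bg_dist) ([], none, 0))
  (runs.zip runs.tail).foldl
    (fun count p => if 2 ≤ p.1 ∧ 2 ≤ p.2 then count + 1 else count) 0

-- ===== PRECONDITION & SPEC =====
def Spec_nbOsci (dist_vec : List Int) (bg_dist : Int) (out : Int) : Prop := out = nbOsci_alt dist_vec bg_dist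
instance (dist_vec : List Int) (bg_dist : Int) (out : Int) : Decidable (Spec_nbOsci dist_vec bg_dist out) := by unfold Spec_nbOsci; infer_instance

-- ===== CLAIM (what is proved, stated in full; the proofs are below) =====
def Claim_equal_nbOsci : Prop := ∀ (dist_vec : List Int) (bg_dist : Int), Dom_nbOsci dist_vec bg_dist → Spec_nbOsci dist_vec bg_dist (nbOsci dist_vec bg_dist)

-- ===== LEMMAS AND PROOFS =====

-- the window test of A, as a Bool on four raw values
def winB (bg a b c d : Int) : Bool :=
  (decide (a > bg) == decide (b > bg)) && (decide (c > bg) == decide (d > bg)) &&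
    (decide (b > bg) != decide (d > bg))

-- structural sliding-window count (reference form of A)
def wc (bg : Int) : List Int → Int
  | a :: b :: c :: d :: t => (if winB bg a b c d then 1 else 0) + wc bg (b :: c :: d :: t)
  | _ => 0

-- window count with the two pending bits made explicit
def wcT (bg : Int) (p q : Bool) : List Int → Int
  | c :: d :: t =>
      (if (p == q) && (decide (c > bg) == decide (d > bg)) && (q != decide (d > bg)) then 1 else 0)
        + wcT bg q (decide (c > bg)) (d :: t)
  | _ => 0

-- state-machine count: current bit b, flag two = "current run has length ≥ 2"
def wcR (bg : Int) (b two : Bool) : List Int → Int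
  | c :: d :: t =>
      (if (two && (decide (c > bg) == decide (d > bg)) && (b != decide (c > bg))) then 1 else 0)
        + wcR bg (decide (c > bg)) (b == decide (c > bg)) (d :: t)
  | _ => 0

-- reference RLE (run lengths of the bit sequence)
def rleGo (bg : Int) (b : Bool) (n : Nat) : List Int → List Nat
  | [] => [n]
  | y :: ys => if decide (y > bg) = b then rleGo bg b (n + 1) ys
               else n :: rleGo bg (decide (y > bg)) 1 ys

def pyRle (bg : Int) : List Int → List Nat
  | [] => []
  | x :: xs => rleGo bg (decide (x > bg)) 1 xs

-- adjacent-pair count on run lengths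
def pairCount : List Nat → Int
  | a :: b :: t => (if 2 ≤ a ∧ 2 ≤ b then 1 else 0) + pairCount (b :: t)
  | _ => 0

lemma rleGo_cons (bg : Int) : ∀ (xs : List Int) (b : Bool) (n : Nat),
    ∃ m t, rleGo bg b n xs = m :: t ∧ n ≤ m := by
  intro xs
  induction xs with
  | nil => intro b n; exact ⟨n, [], rfl, le_refl n⟩
  | cons y ys ih =>
      intro b n
      by_cases h : decide (y > bg) = b
      · obtain ⟨m, t, he, hm⟩ := ih b (n + 1)
        exact ⟨m, t, by simp [rleGo, h, he], by omega⟩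
      · exact ⟨n, rleGo bg (decide (y > bg)) 1 ys, by simp [rleGo, h], le_refl n⟩

-- RLE loop invariant: the fold with a live run (prev = some b, cur = n ≥ 1)
lemma foldl_rleStep (bg : Int) : ∀ (xs : List Int) (rs : List Nat) (b : Bool) (n : Nat), n ≠ 0 →
    finalizeRuns (xs.foldl (rleStep bg) (rs, some b, n)) = rs ++ rleGo bg b n xs := by
  intro xs
  induction xs with
  | nil => intro rs b n hn; simp [finalizeRuns, rleGo, hn]
  | cons y ys ih =>
      intro rs b n hn
      by_cases h : decide (y > bg) = b
      · simp only [List.foldl_cons, rleStep, h]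
        simpa [rleGo, h] using ih rs b (n + 1) (by omega)
      · have hne : ¬ (some (decide (y > bg)) = some b) := by simpa using h
        simp only [List.foldl_cons, rleStep, hne, hn, ne_eq, not_false_iff, if_false,
          if_true]
        rw [ih (rs ++ [n]) (decide (y > bg)) 1 (by omega)]
        simp [rleGo, h]

lemma runs_eq_pyRle (bg : Int) (xs : List Int) :
    finalizeRuns (xs.foldl (rleStep bg) ([], none, 0)) = pyRle bg xs := by
  cases xs with
  | nil => simp [finalizeRuns, pyRle]
  | cons x xs =>
      simp only [List.foldl_cons, rleStep, pyRle]
      simpa using foldl_rleStep bg xs [] (decide (x > bg)) 1 (by omega)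

lemma foldl_pair (c : Int) : ∀ (r : List Nat),
    (r.zip r.tail).foldl (fun count p => if 2 ≤ p.1 ∧ 2 ≤ p.2 then count + 1 else count) c
      = c + pairCount r := by
  intro r
  induction r generalizing c with
  | nil => simp [pairCount]
  | cons a r ih =>
      cases r with
      | nil => simp [pairCount]
      | cons b t =>
          simp only [List.tail_cons, List.zip_cons_cons, List.foldl_cons]
          rw [show (b :: t).zip t = (b :: t).zip (b :: t).tail from rfl, ih]
          simp only [pairCount]
          split_ifs <;> omega

-- main RLE ↔ state-machine correspondence
lemma pairCount_rleGo (bg : Int) : ∀ (xs : List Int) (b : Bool) (n : Nat), 1 ≤ n →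
    pairCount (rleGo bg b n xs) = wcR bg b (decide (2 ≤ n)) xs := by
  intro xs
  induction xs with
  | nil => intro b n _; simp [rleGo, pairCount, wcR]
  | cons y ys ih =>
      intro b n hn
      by_cases h : decide (y > bg) = b
      · rw [show rleGo bg b n (y :: ys) = rleGo bg b (n + 1) ys from by simp [rleGo, h]]
        rw [ih b (n + 1) (by omega),
          show decide (2 ≤ n + 1) = true from by simp; omega]
        cases ys with
        | nil => simp [wcR]
        | cons d t => simp [wcR, h]
      · rw [show rleGo bg b n (y :: ys) = n :: rleGo bg (decide (y > bg)) 1 ys from by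
            simp [rleGo, h]]
        cases ys with
        | nil =>
            simp [rleGo, pairCount, wcR]
        | cons d t =>
            obtain ⟨m, tt, he, hm⟩ := rleGo_cons bg (d :: t) (decide (y > bg)) 1
            have hb : (b != decide (y > bg)) = true := by
              cases b <;> cases hby : decide (y > bg) <;> simp_all
            -- head of the next run is ≥ 2 iff d continues the y-run
            have hhead : (2 ≤ m) ↔ (decide (d > bg) = decide (y > bg)) := by
              by_cases hd : decide (d > bg) = decide (y > bg)
              · obtain ⟨m', tt', he', hm'⟩ := rleGo_cons bg t (decide (y > bg)) 2
                have : rleGo bg (decide (y > bg)) 1 (d :: t) = m' :: tt' := by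
                  simp [rleGo, hd, he']
                rw [he] at this
                cases this
                constructor <;> intro _ <;> [exact hd; omega]
              · have : rleGo bg (decide (y > bg)) 1 (d :: t)
                    = 1 :: rleGo bg (decide (d > bg)) 1 t := by simp [rleGo, hd]
                rw [he] at this
                cases this
                constructor <;> intro hx <;> [omega; exact absurd hx hd]
            rw [he]
            simp only [pairCount]
            rw [← he, ih (decide (y > bg)) 1 (by omega)]
            simp only [wcR, hb]
            have h1 : decide (2 ≤ (1:Nat)) = false := by decide
            rw [h1]
            have hbe : (b == decide (y > bg)) = false := by
              cases b <;> cases hby : decide (y > bg) <;> simp_all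
            rw [hbe]
            by_cases hd : decide (d > bg) = decide (y > bg)
            · have hm2 : 2 ≤ m := hhead.mpr hd
              by_cases h2n : 2 ≤ n
              · simp [hd, h2n, hm2]
              · simp [hd, h2n, hm2]
            · have hm2 : ¬ 2 ≤ m := fun hx => hd (hhead.mp hx)
              have hdy : (decide (y > bg) == decide (d > bg)) = false := by
                cases hq : decide (y > bg) <;> cases hp : decide (d > bg) <;> simp_all
              simp [hdy, hm2]

-- wc with the first two elements peeled off
lemma wc_cons2 (bg : Int) : ∀ (rest : List Int) (a b : Int),
    wc bg (a :: b :: rest) = wcT bg (decide (a > bg)) (decide (b > bg)) rest := by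
  intro rest
  induction rest with
  | nil => intro a b; simp [wc, wcT]
  | cons c rs ih =>
      intro a b
      cases rs with
      | nil => simp [wc, wcT]
      | cons d t =>
          simp only [wc, wcT, winB]
          rw [ih b c]
          rfl

lemma wcT_eq_wcR (bg : Int) : ∀ (t : List Int) (p q : Bool),
    wcT bg p q t = wcR bg q (p == q) t := by
  intro t
  induction t with
  | nil => intro p q; simp [wcT, wcR]
  | cons c t ih =>
      intro p q
      cases t with
      | nil => simp [wcT, wcR]
      | cons d tt =>
          simp only [wcT, wcR]
          rw [ih q (decide (c > bg))]
          congr 1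
          by_cases hcd : decide (c > bg) = decide (d > bg)
          · have : (q != decide (d > bg)) = (q != decide (c > bg)) := by rw [hcd]
            rw [this]
          · have : (decide (c > bg) == decide (d > bg)) = false := by
              cases hc : decide (c > bg) <;> cases hd : decide (d > bg) <;> simp_all
            simp [this]

lemma wc_eq_pairCount (bg : Int) (l : List Int) : wc bg l = pairCount (pyRle bg l) := by
  cases l with
  | nil => simp [wc, pyRle, pairCount]
  | cons x xs =>
      rw [show pyRle bg (x :: xs) = rleGo bg (decide (x > bg)) 1 xs from rfl,
        pairCount_rleGo bg xs (decide (x > bg)) 1 (by omega)]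
      have h1 : decide (2 ≤ (1:Nat)) = false := by decide
      rw [h1]
      cases xs with
      | nil => simp [wc, wcR]
      | cons b rest =>
          rw [wc_cons2 bg rest x b, wcT_eq_wcR bg rest (decide (x > bg)) (decide (b > bg))]
          cases rest with
          | nil => simp [wcR]
          | cons c t =>
              simp [wcR]

-- wc of a list with one element appended
lemma wc_append (bg : Int) : ∀ (l : List Int) (x : Int),
    wc bg (l ++ [x]) = wc bg l +
      (if 3 ≤ l.length then
        (if winB bg (l.getD (l.length - 3) 0) (l.getD (l.length - 2) 0)
            (l.getD (l.length - 1) 0) x then 1 else 0)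
       else 0) := by
  intro l
  induction l with
  | nil => intro x; simp [wc]
  | cons a ls ih =>
      intro x
      rcases ls with _ | ⟨b, _ | ⟨c, _ | ⟨e, t'⟩⟩⟩
      · simp [wc]
      · simp [wc]
      · simp [wc]
      · rw [show (a :: b :: c :: e :: t') ++ [x] = a :: b :: c :: e :: (t' ++ [x]) from rfl]
        simp only [wc]
        rw [show b :: c :: e :: (t' ++ [x]) = (b :: c :: e :: t') ++ [x] from rfl, ih x]
        have h1 : ((a :: b :: c :: e :: t') : List Int).length = t'.length + 4 := by
          simp
        have h2 : ((b :: c :: e :: t') : List Int).length = t'.length + 3 := by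
          simp
        rw [h1, h2]
        rw [if_pos (by omega : 3 ≤ t'.length + 4), if_pos (by omega : 3 ≤ t'.length + 3)]
        rw [show t'.length + 4 - 3 = t'.length + 1 from by omega,
            show t'.length + 4 - 2 = t'.length + 1 + 1 from by omega,
            show t'.length + 4 - 1 = t'.length + 1 + 1 + 1 from by omega,
            show t'.length + 3 - 3 = t'.length from by omega,
            show t'.length + 3 - 2 = t'.length + 1 from by omega,
            show t'.length + 3 - 1 = t'.length + 1 + 1 from by omega]
        simp only [List.getD_cons_succ]
        omega

lemma wc_short (bg : Int) (l : List Int) (h : l.length ≤ 3) : wc bg l = 0 := by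
  rcases l with _ | ⟨a, _ | ⟨b, _ | ⟨c, _ | ⟨d, t⟩⟩⟩⟩
  · simp [wc]
  · simp [wc]
  · simp [wc]
  · simp [wc]
  · simp at h; omega

-- A's port computes wc
lemma nbOsci_eq_wc (bg : Int) (l : List Int) : nbOsci l bg = wc bg l := by
  induction l using List.reverseRecOn with
  | nil => simp [nbOsci, wc, PySem.List.pyRange_one_eq_nil]
  | append_singleton l x ih =>
      by_cases h3 : 3 ≤ l.length
      · have hlen : ((l ++ [x]).length : Int) = (l.length : Int) + 1 := by
          simp
        unfold nbOsci
        rw [hlen, PySem.List.pyRange_one_succ_right (by exact_mod_cast h3),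
          List.foldl_append]
        have hcongr : (PySem.List.pyRange 3 (l.length : Int) 1).foldl
            (fun acc i =>
              let s0 := decide (PySem.List.pyGetD (l ++ [x]) (i - 3) 0 > bg)
              let s1 := decide (PySem.List.pyGetD (l ++ [x]) (i - 2) 0 > bg)
              let s2 := decide (PySem.List.pyGetD (l ++ [x]) (i - 1) 0 > bg)
              let s3 := decide (PySem.List.pyGetD (l ++ [x]) i 0 > bg)
              if (s0 == s1) && (s2 == s3) && (s1 != s3) then acc + 1 else acc) 0
            = nbOsci l bg := by
          unfold nbOsci
          apply PySem.List.foldl_congr_mem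
          intro acc i hi
          have hmem := (PySem.List.mem_pyRange_one.mp hi)
          have hgd : ∀ j : Int, 0 ≤ j → j < (l.length : Int) →
              PySem.List.pyGetD (l ++ [x]) j 0 = PySem.List.pyGetD l j 0 := by
            intro j hj0 hjl
            rw [PySem.List.pyGetD_eq_getElem _ _ hj0 (by simp; omega),
              PySem.List.pyGetD_eq_getElem _ _ hj0 (by exact_mod_cast hjl)]
            exact List.getElem_append_left (by omega)
          rw [hgd (i - 3) (by omega) (by omega), hgd (i - 2) (by omega) (by omega),
            hgd (i - 1) (by omega) (by omega), hgd i (by omega) (by omega)]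
        rw [hcongr, ih, wc_append bg l x, if_pos h3]
        simp only [List.foldl_cons, List.foldl_nil]
        have hx : PySem.List.pyGetD (l ++ [x]) (l.length : Int) 0 = x := by
          rw [PySem.List.pyGetD_eq_getElem _ _ (by omega) (by simp)]
          simp
        have e3 : PySem.List.pyGetD (l ++ [x]) ((l.length : Int) - 3) 0
            = l.getD (l.length - 3) 0 := by
          rw [PySem.List.pyGetD_eq_getElem _ _ (by omega) (by simp),
            List.getElem_append_left (by omega), List.getD_eq_getElem _ _ (by omega)]
          congr 1
          omega
        have e2 : PySem.List.pyGetD (l ++ [x]) ((l.length : Int) - 2) 0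
            = l.getD (l.length - 2) 0 := by
          rw [PySem.List.pyGetD_eq_getElem _ _ (by omega) (by simp),
            List.getElem_append_left (by omega), List.getD_eq_getElem _ _ (by omega)]
          congr 1
          omega
        have e1 : PySem.List.pyGetD (l ++ [x]) ((l.length : Int) - 1) 0
            = l.getD (l.length - 1) 0 := by
          rw [PySem.List.pyGetD_eq_getElem _ _ (by omega) (by simp),
            List.getElem_append_left (by omega), List.getD_eq_getElem _ _ (by omega)]
          congr 1
          omega
        simp only [e3, e2, e1, hx, winB]
        split_ifs <;> omega
      · have hnil : PySem.List.pyRange 3 ((l ++ [x]).length : Int) 1 = [] := by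
          apply PySem.List.pyRange_one_eq_nil
          simp; omega
        unfold nbOsci
        rw [hnil]
        rw [wc_short bg (l ++ [x]) (by simp; omega)]
        rfl

-- ===== VERDICT (by name: the statement is the Claim_ definition above) =====
theorem nbOsci_spec : Claim_equal_nbOsci := by
  intro dist_vec bg_dist _
  unfold Spec_nbOsci nbOsci_alt
  rw [runs_eq_pyRle bg_dist dist_vec]
  rw [foldl_pair 0 (pyRle bg_dist dist_vec)]
  rw [nbOsci_eq_wc bg_dist dist_vec, wc_eq_pairCount bg_dist dist_vec]
  ring
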